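-- pv_equiv track=rewrite | github.com/JacobTyo/Valla | valla/utils/adhominem_preprocess.py | count_tokens_and_characters_multiproc
-- ===== SOURCE A (Python) =====
-- def count_tokens_and_characters_multiproc(doc):
--     dict_chr_counts, dict_token_counts = {}, {}
--     for sent in doc:
--         tokens = sent.split()
--         for token in tokens:
--             for chr in token:
--                 if chr not in dict_chr_counts:
--                     dict_chr_counts[chr] = 0
--                 dict_chr_counts[chr] += 1
--             if token not in dict_token_counts:
--                 dict_token_counts[token] = 0
--             dict_token_counts[token] += 1
--     return dict_chr_counts, dict_token_counts
-- ===== SOURCE B (Python) =====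
-- def count_tokens_and_characters_multiproc(doc):
--     # Pass 1: token frequencies.
--     dict_token_counts = {}
--     for sent in doc:
--         for token in sent.split():
--             dict_token_counts[token] = dict_token_counts.get(token, 0) + 1
--     # Pass 2: derive character counts from the DISTINCT tokens, each weighted
--     # by its frequency -- each token's characters are scanned only once.
--     dict_chr_counts = {}
--     for token, freq in dict_token_counts.items():
--         for chr in token:
--             dict_chr_counts[chr] = dict_chr_counts.get(chr, 0) + freq
--     return dict_chr_counts, dict_token_counts
-- ===== Notes on version B (the rewrite author's own statement) =====
-- stated objective: faster
-- what changed: B never tallies the raw character stream: it first builds the token-frequency dict in one pass, then computes character counts from the DISTINCT tokens only, adding each token's characters weighted by its frequency, so a repeated token's characters are scanned once instead of once per occurrence.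
import Mathlib
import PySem

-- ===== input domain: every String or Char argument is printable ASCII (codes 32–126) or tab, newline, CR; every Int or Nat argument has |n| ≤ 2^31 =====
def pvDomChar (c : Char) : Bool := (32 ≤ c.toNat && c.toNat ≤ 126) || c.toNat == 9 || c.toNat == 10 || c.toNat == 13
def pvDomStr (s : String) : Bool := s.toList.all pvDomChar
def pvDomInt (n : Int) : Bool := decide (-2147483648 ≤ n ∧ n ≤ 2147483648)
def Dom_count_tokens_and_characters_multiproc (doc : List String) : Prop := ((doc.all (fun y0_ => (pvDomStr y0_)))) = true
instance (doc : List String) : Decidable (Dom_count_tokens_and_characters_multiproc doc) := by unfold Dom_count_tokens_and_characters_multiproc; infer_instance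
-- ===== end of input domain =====

-- B derives the character counts from the DISTINCT tokens of the token-frequency dict
-- (each token's characters added once, weighted by its frequency) instead of tallying the
-- raw character stream, so a repeated token is scanned once (objective: faster; measured).

-- ===== PORT A =====
def count_tokens_and_characters_multiproc (doc : List String) : (List (String × Int)) × (List (String × Int)) :=
  let st := doc.foldl (fun (st : PySem.Dict String Int × PySem.Dict String Int) sent =>
    let tokens := PySem.Str.split₀ sent
    tokens.foldl (fun st token =>
      let dc := token.toList.foldl (fun dc c =>
        let k := String.singleton c
        let dc := if dc.contains k then dc else dc.insert k 0
        dc.insert k (dc.getD k 0 + 1)) st.1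
      let dt := if st.2.contains token then st.2 else st.2.insert token 0
      (dc, dt.insert token (dt.getD token 0 + 1))) st)
    (PySem.Dict.empty, PySem.Dict.empty)
  (st.1.items, st.2.items)

-- ===== PORT B =====
def count_tokens_and_characters_multiproc_alt (doc : List String) : (List (String × Int)) × (List (String × Int)) :=
  -- pass 1: token frequencies
  let tok := doc.foldl (fun (d : PySem.Dict String Int) sent =>
    (PySem.Str.split₀ sent).foldl (fun d token => d.insert token (d.getD token 0 + 1)) d)
    PySem.Dict.empty
  -- pass 2: character counts from the distinct tokens, weighted by frequency
  let chr := tok.items.foldl (fun (d : PySem.Dict String Int) p =>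
    p.1.toList.foldl (fun d c =>
      let k := String.singleton c
      d.insert k (d.getD k 0 + p.2)) d)
    PySem.Dict.empty
  (chr.items, tok.items)

-- ===== PRECONDITION & SPEC =====
def Spec_count_tokens_and_characters_multiproc (doc : List String) (out : (List (String × Int)) × (List (String × Int))) : Prop := out = count_tokens_and_characters_multiproc_alt doc
instance (doc : List String) (out : (List (String × Int)) × (List (String × Int))) : Decidable (Spec_count_tokens_and_characters_multiproc doc out) := by unfold Spec_count_tokens_and_characters_multiproc; infer_instance

-- ===== CLAIM (what is proved, stated in full; the proofs are below) =====
def Claim_equal_count_tokens_and_characters_multiproc : Prop := ∀ (doc : List String), Dom_count_tokens_and_characters_multiproc doc → Spec_count_tokens_and_characters_multiproc doc (count_tokens_and_characters_multiproc doc)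

-- ===== LEMMAS AND PROOFS =====

-- the counting update (weight 1) and the weighted update B uses
def pvCnt (d : PySem.Dict String Int) (k : String) : PySem.Dict String Int :=
  d.insert k (d.getD k 0 + 1)

def pvAddW (d : PySem.Dict String Int) (k : String) (w : Int) : PySem.Dict String Int :=
  d.insert k (d.getD k 0 + w)

-- a token's characters, as the singleton strings the dicts are keyed by
def pvChars (t : String) : List String := t.toList.map String.singleton

-- ---------- A's side: the interleaved loop tallies the two flattened streams ----------

-- A's "if absent set 0, then += 1" equals one counting insert
lemma pvStepA_eq (d : PySem.Dict String Int) (k : String) :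
    (let d' := if d.contains k then d else d.insert k 0
     d'.insert k (d'.getD k 0 + 1)) = pvCnt d k := by
  by_cases h : d.contains k = true
  · simp [h, pvCnt]
  · simp only [if_neg h]
    rw [PySem.Dict.insert_insert_self, PySem.Dict.getD_insert_self, pvCnt,
        PySem.Dict.getD_of_not_contains d (k := k) (d0 := 0) (by simpa using h)]

-- A's inner char loop over one token = counting fold over that token's singleton chars
lemma pvCharLoop (t : String) (d : PySem.Dict String Int) :
    t.toList.foldl (fun dc c =>
        let k := String.singleton c
        let dc := if dc.contains k then dc else dc.insert k 0
        dc.insert k (dc.getD k 0 + 1)) d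
      = (pvChars t).foldl pvCnt d := by
  rw [pvChars, List.foldl_map]
  induction t.toList generalizing d with
  | nil => rfl
  | cons c cs ih => simp only [List.foldl_cons]; rw [pvStepA_eq]; exact ih _

-- A's token loop, both components at once
lemma pvTokLoop (ts : List String) (dc dt : PySem.Dict String Int) :
    ts.foldl (fun st token =>
        let dc := token.toList.foldl (fun dc c =>
          let k := String.singleton c
          let dc := if dc.contains k then dc else dc.insert k 0
          dc.insert k (dc.getD k 0 + 1)) st.1
        let dt := if st.2.contains token then st.2 else st.2.insert token 0
        (dc, dt.insert token (dt.getD token 0 + 1))) (dc, dt)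
      = ((ts.flatMap pvChars).foldl pvCnt dc, ts.foldl pvCnt dt) := by
  induction ts generalizing dc dt with
  | nil => rfl
  | cons t ts ih =>
    simp only [List.foldl_cons, List.flatMap_cons, List.foldl_append]
    rw [pvCharLoop, pvStepA_eq]
    exact ih _ _

-- the whole of A's double loop = two counting folds over the flattened streams
lemma pvMain (doc : List String) (dc dt : PySem.Dict String Int) :
    doc.foldl (fun (st : PySem.Dict String Int × PySem.Dict String Int) sent =>
        let tokens := PySem.Str.split₀ sent
        tokens.foldl (fun st token =>
          let dc := token.toList.foldl (fun dc c =>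
            let k := String.singleton c
            let dc := if dc.contains k then dc else dc.insert k 0
            dc.insert k (dc.getD k 0 + 1)) st.1
          let dt := if st.2.contains token then st.2 else st.2.insert token 0
          (dc, dt.insert token (dt.getD token 0 + 1))) st) (dc, dt)
      = (((doc.flatMap (fun s => PySem.Str.split₀ s)).flatMap pvChars).foldl pvCnt dc,
         (doc.flatMap (fun s => PySem.Str.split₀ s)).foldl pvCnt dt) := by
  induction doc generalizing dc dt with
  | cons s doc ih =>
    simp only [List.foldl_cons, List.flatMap_cons, List.flatMap_append, List.foldl_append]
    rw [pvTokLoop]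
    exact ih _ _
  | nil => rfl

-- ---------- B's side ----------

-- B's inner char loop over one token, in pvChars/pvAddW form
lemma pvInnerChar (t : String) (w : Int) (d : PySem.Dict String Int) :
    t.toList.foldl (fun d c =>
        let k := String.singleton c
        d.insert k (d.getD k 0 + w)) d
      = (pvChars t).foldl (fun d k => pvAddW d k w) d := by
  rw [pvChars, List.foldl_map]; rfl

-- getD after a weighted fold over one token's chars
lemma pvInner_getD (l : List String) (w : Int) (k : String) : ∀ d : PySem.Dict String Int,
    (l.foldl (fun d c => pvAddW d c w) d).getD k 0 = d.getD k 0 + w * (l.count k : Int) := by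
  induction l with
  | nil => simp
  | cons c l ih =>
    intro d
    rw [List.foldl_cons, ih, pvAddW, PySem.Dict.getD_insert]
    by_cases h : k = c
    · rw [if_pos h, h, List.count_cons_self]; push_cast; ring
    · rw [if_neg h, List.count_cons_of_ne (Ne.symm h)]

-- getD after B's whole second pass
lemma pvOuter_getD (ps : List (String × Int)) (k : String) : ∀ d : PySem.Dict String Int,
    (ps.foldl (fun d p => (pvChars p.1).foldl (fun d c => pvAddW d c p.2) d) d).getD k 0
      = d.getD k 0 + (ps.map (fun p => p.2 * ((pvChars p.1).count k : Int))).sum := by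
  induction ps with
  | nil => simp
  | cons p ps ih =>
    intro d
    rw [List.foldl_cons, ih, pvInner_getD]
    simp only [List.map_cons, List.sum_cons]
    ring

-- B's second pass, flattened into one fold over (char, weight) pairs
lemma pvOuterFlatten (ps : List (String × Int)) (d : PySem.Dict String Int) :
    ps.foldl (fun d p => (pvChars p.1).foldl (fun d c => pvAddW d c p.2) d) d
      = (ps.flatMap (fun p => (pvChars p.1).map (fun c => (c, p.2)))).foldl
          (fun d q => d.insert q.1 (d.getD q.1 0 + q.2)) d := by
  rw [List.foldl_flatMap]
  apply PySem.List.foldl_congr_mem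
  intro acc p _
  rw [List.foldl_map]
  rfl

-- keys produced by B's second pass
lemma pvKeysB (ps : List (String × Int)) :
    ((ps.foldl (fun d p => (pvChars p.1).foldl (fun d c => pvAddW d c p.2) d)
        (PySem.Dict.empty : PySem.Dict String Int))).keys
      = PySem.Set.ofList (ps.flatMap (fun p => pvChars p.1)) := by
  rw [pvOuterFlatten,
      PySem.Dict.keys_foldl_insert_key _ Prod.fst (fun d q => d.getD q.1 0 + q.2)]
  simp [PySem.Dict.keys_empty, PySem.Set.update, PySem.Set.ofList_eq_foldl,
        List.map_flatMap, Function.comp_def, List.map_map]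

lemma pvNodupB (ps : List (String × Int)) :
    ((ps.foldl (fun d p => (pvChars p.1).foldl (fun d c => pvAddW d c p.2) d)
        (PySem.Dict.empty : PySem.Dict String Int))).keys.Nodup := by
  rw [pvOuterFlatten]
  exact PySem.Dict.nodup_keys_foldl_insert_key _ Prod.fst (fun d q => d.getD q.1 0 + q.2) _
    (by simp [PySem.Dict.keys_empty])

-- ---------- set lemmas: first-occurrence order of chars is the same over both streams ----------

lemma pvOfListAppend (xs ys : List String) :
    PySem.Set.ofList (xs ++ ys) = PySem.Set.update (PySem.Set.ofList xs) ys := by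
  simp [PySem.Set.ofList_eq_foldl, PySem.Set.update, List.foldl_append]

lemma pvUpdateSubset (ys : List String) : ∀ s : PySem.Set String,
    (∀ y ∈ ys, y ∈ s) → PySem.Set.update s ys = s := by
  induction ys with
  | nil => intro s _; rfl
  | cons y ys ih =>
    intro s h
    have hadd : s.add y = s := by
      simp [PySem.Set.add, PySem.Set.contains, h y (by simp)]
    have : PySem.Set.update s (y :: ys) = PySem.Set.update (s.add y) ys := rfl
    rw [this, hadd]
    exact ih s (fun z hz => h z (by simp [hz]))

lemma pvOfListSnocMem (l : List String) (t : String) (h : t ∈ l) :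
    PySem.Set.ofList (l ++ [t]) = PySem.Set.ofList l := by
  rw [pvOfListAppend]
  refine pvUpdateSubset [t] _ ?_
  intro y hy
  rw [List.mem_singleton] at hy
  subst hy
  exact (PySem.Set.mem_ofList l y).mpr h

lemma pvOfListSnocNotMem (l : List String) (t : String) (h : t ∉ l) :
    PySem.Set.ofList (l ++ [t]) = PySem.Set.ofList l ++ [t] := by
  rw [pvOfListAppend]
  show (PySem.Set.ofList l).add t = _
  simp [PySem.Set.add, PySem.Set.contains, PySem.Set.mem_ofList, h]

-- iterating the distinct tokens preserves the first-occurrence order of their chars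
lemma pvOfListDedupFlatMap (g : String → List String) (l : List String) :
    PySem.Set.ofList ((PySem.Set.ofList l).flatMap g) = PySem.Set.ofList (l.flatMap g) := by
  induction l using List.reverseRecOn with
  | nil => rfl
  | append_singleton l t ih =>
    by_cases h : t ∈ l
    · rw [pvOfListSnocMem l t h, ih, List.flatMap_append, pvOfListAppend]
      refine (pvUpdateSubset _ _ ?_).symm
      intro y hy
      simp only [List.flatMap_cons, List.flatMap_nil, List.append_nil] at hy
      rw [PySem.Set.mem_ofList]
      exact List.mem_flatMap.mpr ⟨t, h, hy⟩
    · rw [pvOfListSnocNotMem l t h, List.flatMap_append, List.flatMap_append,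
          pvOfListAppend, pvOfListAppend, ih]

-- ---------- the counting identity ----------

lemma pvSumIte (c : String → Int) (t : String) : ∀ S : List String, S.Nodup → t ∈ S →
    (S.map (fun u => if u = t then c u else 0)).sum = c t := by
  intro S
  induction S with
  | nil => simp
  | cons u S ih =>
    intro hnd hm
    simp only [List.map_cons, List.sum_cons]
    rcases List.mem_cons.mp hm with rfl | hm'
    · rw [if_pos rfl]
      have hz : ∀ x ∈ S.map (fun v => if v = t then c v else 0), x = 0 := by
        intro x hx
        rcases List.mem_map.mp hx with ⟨v, hv, rfl⟩
        have : v ≠ t := fun e => (List.nodup_cons.mp hnd).1 (e ▸ hv)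
        simp [this]
      rw [List.sum_eq_zero hz]; ring
    · have hne : u ≠ t := fun e => (List.nodup_cons.mp hnd).1 (e ▸ hm')
      rw [if_neg hne, ih (List.nodup_cons.mp hnd).2 hm']; ring

-- char count over the whole stream = frequency-weighted char count over distinct tokens
lemma pvCountFlat (g : String → List String) (k : String) (l : List String) :
    ((PySem.Set.ofList l).map (fun u => ((l.count u : Int)) * ((g u).count k : Int))).sum
      = ((l.flatMap g).count k : Int) := by
  induction l using List.reverseRecOn with
  | nil => rfl
  | append_singleton l t ih =>
    have hcnt : ∀ u : String, ((l ++ [t]).count u : Int)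
        = (l.count u : Int) + (if u = t then 1 else 0) := by
      intro u
      rw [List.count_append]
      by_cases h : u = t
      · simp [h]
      · simp [h, Ne.symm h]
    rw [List.flatMap_append]
    by_cases h : t ∈ l
    · rw [pvOfListSnocMem l t h]
      have hmap : ((PySem.Set.ofList l).map
            (fun u => (((l ++ [t]).count u : Int)) * ((g u).count k : Int)))
          = (PySem.Set.ofList l).map
            (fun u => ((l.count u : Int)) * ((g u).count k : Int)
              + (if u = t then ((g u).count k : Int) else 0)) := by
        apply List.map_congr_left
        intro u _
        rw [hcnt u]
        by_cases hu : u = t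
        · rw [if_pos hu, if_pos hu]; ring
        · rw [if_neg hu, if_neg hu]; ring
      rw [hmap, PySem.List.sum_map_add_int, ih,
          pvSumIte _ t _ (PySem.Set.nodup_ofList l) ((PySem.Set.mem_ofList l t).mpr h)]
      simp [List.count_append]
    · rw [pvOfListSnocNotMem l t h, List.map_append, List.sum_append]
      have hmap : ((PySem.Set.ofList l).map
            (fun u => (((l ++ [t]).count u : Int)) * ((g u).count k : Int)))
          = (PySem.Set.ofList l).map
            (fun u => ((l.count u : Int)) * ((g u).count k : Int)) := by
        apply List.map_congr_left
        intro u hu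
        have : u ≠ t := fun e => h (e ▸ (PySem.Set.mem_ofList l u).mp hu)
        rw [hcnt u, if_neg this]; ring
      have ht : ((l ++ [t]).count t : Int) = 1 := by
        rw [hcnt t, if_pos rfl, List.count_eq_zero.mpr h]; ring
      rw [hmap, ih]
      simp only [List.map_cons, List.map_nil, List.sum_cons, List.sum_nil,
        List.flatMap_cons, List.flatMap_nil, List.append_nil, add_zero]
      rw [ht, List.count_append]
      push_cast
      ring

-- ---------- putting B's char dict against A's ----------

lemma pvCharItems (ts : List String) :
    (((PySem.Dict.counter ts).items.foldl
        (fun d p => (pvChars p.1).foldl (fun d c => pvAddW d c p.2) d)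
        (PySem.Dict.empty : PySem.Dict String Int))).items
      = (PySem.Dict.counter (ts.flatMap pvChars)).items := by
  set dB := (PySem.Dict.counter ts).items.foldl
      (fun d p => (pvChars p.1).foldl (fun d c => pvAddW d c p.2) d)
      (PySem.Dict.empty : PySem.Dict String Int) with hdB
  have hkeys : dB.keys = (PySem.Dict.counter (ts.flatMap pvChars)).keys := by
    rw [hdB, pvKeysB, PySem.Dict.keys_counter, PySem.Dict.items_counter]
    rw [List.flatMap_map]
    exact pvOfListDedupFlatMap pvChars ts
  have hgetD : ∀ k, dB.getD k 0 = (PySem.Dict.counter (ts.flatMap pvChars)).getD k 0 := by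
    intro k
    rw [hdB, pvOuter_getD, PySem.Dict.getD_empty, PySem.Dict.getD_counter,
        PySem.Dict.items_counter, List.map_map]
    have : ((fun p : String × Int => p.2 * ((pvChars p.1).count k : Int)) ∘
        fun u => (u, (ts.count u : Int)))
        = fun u => ((ts.count u : Int)) * (((pvChars u).count k : Int)) := rfl
    rw [this, pvCountFlat pvChars k ts]
    ring
  rw [PySem.Dict.items_eq_map_keys dB (hdB ▸ pvNodupB _) 0,
      PySem.Dict.items_eq_map_keys _ (PySem.Dict.nodup_keys_counter _) 0, hkeys]
  exact List.map_congr_left (fun k _ => by rw [hgetD k])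

-- ===== VERDICT (by name: the statement is the Claim_ definition above) =====
theorem count_tokens_and_characters_multiproc_spec : Claim_equal_count_tokens_and_characters_multiproc := by
  intro doc _
  show _ = _
  unfold count_tokens_and_characters_multiproc count_tokens_and_characters_multiproc_alt
  rw [pvMain]
  have htok : doc.foldl (fun (d : PySem.Dict String Int) sent =>
      (PySem.Str.split₀ sent).foldl (fun d token => d.insert token (d.getD token 0 + 1)) d)
      PySem.Dict.empty
      = (doc.flatMap (fun s => PySem.Str.split₀ s)).foldl pvCnt PySem.Dict.empty := by
    rw [List.foldl_flatMap]; rfl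
  have hcnt : (doc.flatMap (fun s => PySem.Str.split₀ s)).foldl pvCnt
      (PySem.Dict.empty : PySem.Dict String Int)
      = PySem.Dict.counter (doc.flatMap (fun s => PySem.Str.split₀ s)) :=
    PySem.Dict.foldl_insert_getD_add_one_eq_counter _
  have hchr : ((doc.flatMap (fun s => PySem.Str.split₀ s)).flatMap pvChars).foldl pvCnt
      (PySem.Dict.empty : PySem.Dict String Int)
      = PySem.Dict.counter ((doc.flatMap (fun s => PySem.Str.split₀ s)).flatMap pvChars) :=
    PySem.Dict.foldl_insert_getD_add_one_eq_counter _
  have hinner : ∀ d : PySem.Dict String Int,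
      (PySem.Dict.counter (doc.flatMap (fun s => PySem.Str.split₀ s))).items.foldl
        (fun d (p : String × Int) => p.1.toList.foldl (fun d c =>
          let k := String.singleton c
          d.insert k (d.getD k 0 + p.2)) d) d
      = (PySem.Dict.counter (doc.flatMap (fun s => PySem.Str.split₀ s))).items.foldl
        (fun d (p : String × Int) => (pvChars p.1).foldl (fun d c => pvAddW d c p.2) d) d := by
    intro d
    apply PySem.List.foldl_congr_mem
    intro acc p _
    exact pvInnerChar p.1 p.2 acc
  simp only [htok, hcnt, hchr, hinner]
  exact Prod.ext (pvCharItems _).symm rfl
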